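-- pv_equiv track=rewrite | github.com/conquerheaven/EnergyMonitor | code/Energy/Main.py | getConsecutivePreData
-- ===== SOURCE A (Python) =====
-- def getConsecutivePreData(preData):
--     result = []
--     l = len(preData)-1
--     while l >= 0:
--         if preData[l] > 0: result.append(preData[l])
--         else: break
--         l -= 1
--     result.reverse()
--     return result
-- ===== SOURCE B (Python) =====
-- def getConsecutivePreData(preData):
--     # Single forward pass: remember where the current (final) positive run
--     # starts, then return that trailing suffix with one slice.
--     start = 0
--     for k, v in enumerate(preData):
--         if v <= 0:
--             start = k + 1
--     return preData[start:]
-- ===== Notes on version B (the rewrite author's own statement) =====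
-- stated objective: simpler
-- what changed: Replaced the backward scan with append-accumulator and final reverse by a single forward pass that tracks the start index of the trailing positive run and returns one slice.
import Mathlib
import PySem

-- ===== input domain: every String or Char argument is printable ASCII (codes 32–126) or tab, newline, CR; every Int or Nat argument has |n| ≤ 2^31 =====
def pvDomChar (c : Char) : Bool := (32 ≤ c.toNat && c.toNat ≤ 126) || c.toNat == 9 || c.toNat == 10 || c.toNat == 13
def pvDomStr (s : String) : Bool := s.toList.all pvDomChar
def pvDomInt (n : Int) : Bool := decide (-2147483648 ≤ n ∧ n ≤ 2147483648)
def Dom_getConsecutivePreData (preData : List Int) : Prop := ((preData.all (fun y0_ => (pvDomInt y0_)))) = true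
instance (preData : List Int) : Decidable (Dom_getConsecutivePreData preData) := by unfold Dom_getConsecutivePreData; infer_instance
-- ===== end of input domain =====

-- B replaces A's backward accumulate-then-reverse scan by one forward pass that
-- tracks the start index of the trailing positive run and returns a single slice (objective: simpler).

-- ===== PORT A =====
-- while l >= 0: append preData[l] while positive, break otherwise; fuel = l+1
def pvALoop (preData : List Int) : Nat → List Int → List Int
  | 0, result => result
  | n + 1, result =>
    if PySem.List.pyGetD preData (n : Int) 0 > 0 then
      pvALoop preData n (result ++ [PySem.List.pyGetD preData (n : Int) 0])
    else result

def getConsecutivePreData (preData : List Int) : List Int :=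
  (pvALoop preData preData.length []).reverse

-- ===== PORT B =====
def getConsecutivePreData_alt (preData : List Int) : List Int :=
  let start : Int :=
    (PySem.List.enumerate preData 0).foldl
      (fun start kv => if kv.2 ≤ 0 then kv.1 + 1 else start) 0
  PySem.List.slice preData (some start) none

-- ===== PRECONDITION & SPEC =====
def Spec_getConsecutivePreData (preData : List Int) (out : List Int) : Prop := out = getConsecutivePreData_alt preData
instance (preData : List Int) (out : List Int) : Decidable (Spec_getConsecutivePreData preData out) := by unfold Spec_getConsecutivePreData; infer_instance

-- ===== CLAIM (what is proved, stated in full; the proofs are below) =====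
def Claim_equal_getConsecutivePreData : Prop := ∀ (preData : List Int), Dom_getConsecutivePreData preData → Spec_getConsecutivePreData preData (getConsecutivePreData preData)

-- ===== LEMMAS AND PROOFS =====

-- A's loop, started at fuel n ≤ length, collects the positive run at the back of (take n) in reverse order.
theorem pvALoop_eq (preData : List Int) :
    ∀ n, n ≤ preData.length → ∀ result,
      pvALoop preData n result
        = result ++ ((preData.take n).reverse.takeWhile (fun x => decide (0 < x))) := by
  intro n
  induction n with
  | zero => intro _ result; simp [pvALoop]
  | succ n ih =>
    intro hn result
    have hlt : n < preData.length := by omega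
    have hget : PySem.List.pyGetD preData (n : Int) 0 = preData[n] := by
      simp [PySem.List.pyGetD_natCast, List.getD_eq_getElem?_getD, hlt]
    have htake : (preData.take (n + 1)).reverse = preData[n] :: (preData.take n).reverse := by
      rw [List.take_add_one, List.getElem?_eq_getElem hlt]
      simp
    by_cases hpos : 0 < preData[n]
    · rw [pvALoop, if_pos (by rw [hget]; exact hpos), ih (by omega), htake,
        List.takeWhile_cons_of_pos (by simpa using hpos), hget]
      simp
    · rw [pvALoop, if_neg (by rw [hget]; exact hpos), htake,
        List.takeWhile_cons_of_neg (by simpa using hpos)]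
      simp

-- B's fold: the start index is a valid Nat position and dropping to it yields the trailing positive run.
theorem enumerate_append_singleton (xs : List Int) (x : Int) (s : Int) :
    PySem.List.enumerate (xs ++ [x]) s
      = PySem.List.enumerate xs s ++ [(s + (xs.length : Int), x)] := by
  induction xs generalizing s with
  | nil => simp [PySem.List.enumerate_nil, PySem.List.enumerate_cons]
  | cons y ys ih =>
    simp [PySem.List.enumerate_cons, ih]
    ring_nf

theorem bStart_spec (preData : List Int) :
    0 ≤ ((PySem.List.enumerate preData 0).foldl
          (fun (start : Int) (kv : Int × Int) => if kv.2 ≤ 0 then kv.1 + 1 else start) 0)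
    ∧ ((PySem.List.enumerate preData 0).foldl
          (fun (start : Int) (kv : Int × Int) => if kv.2 ≤ 0 then kv.1 + 1 else start) 0) ≤ preData.length
    ∧ preData.drop (((PySem.List.enumerate preData 0).foldl
          (fun (start : Int) (kv : Int × Int) => if kv.2 ≤ 0 then kv.1 + 1 else start) 0).toNat)
        = (preData.reverse.takeWhile (fun x => decide (0 < x))).reverse := by
  induction preData using List.reverseRecOn with
  | nil => simp
  | append_singleton xs x ih =>
    obtain ⟨h0, hle, hdrop⟩ := ih
    rw [enumerate_append_singleton, List.foldl_append]
    simp only [List.foldl_cons, List.foldl_nil, List.length_append, List.length_cons,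
      List.length_nil, List.reverse_append, List.reverse_cons, List.reverse_nil,
      List.nil_append, List.cons_append]
    by_cases hx : x ≤ 0
    · rw [if_pos hx, List.takeWhile_cons_of_neg (by simpa using hx)]
      refine ⟨by positivity, by push_cast; omega, ?_⟩
      have h1 : ((0 : Int) + (xs.length : Int) + 1).toNat = xs.length + 1 := by omega
      rw [h1]
      simp
    · rw [if_neg hx, List.takeWhile_cons_of_pos (by simpa using (by omega : (0:Int) < x))]
      refine ⟨h0, by push_cast; omega, ?_⟩
      have hnat : (((PySem.List.enumerate xs 0).foldl
          (fun (start : Int) (kv : Int × Int) => if kv.2 ≤ 0 then kv.1 + 1 else start) 0).toNat)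
          ≤ xs.length := by omega
      rw [List.drop_append_of_le_length hnat, hdrop]
      simp

-- ===== VERDICT (by name: the statement is the Claim_ definition above) =====
theorem getConsecutivePreData_spec : Claim_equal_getConsecutivePreData := by
  intro preData _
  unfold Spec_getConsecutivePreData
  obtain ⟨h0, -, hdrop⟩ := bStart_spec preData
  simp only [getConsecutivePreData, getConsecutivePreData_alt]
  rw [pvALoop_eq preData preData.length le_rfl [], PySem.List.slice_from preData h0, hdrop]
  simp
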